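-- pv_equiv track=rewrite | github.com/dan1229/obsidian-google-cal-sync | main.py | insert_calendar_at_top
-- ===== SOURCE A (Python) =====
-- HEADER_CALENDAR_EVENTS = "### Calendar Events\n"
--
-- def insert_calendar_at_top(note_content, events_md):
--     """
--     Inserts the calendar events after a known table (if present)
--     but before the rest of the note.
--     """
--     lines = note_content.splitlines()
--     table_end_idx = -1
--
--     for i, line in enumerate(lines):
--         if "|" in line and "[[" in line and "]]" in line:
--             table_end_idx = i
--
--     if table_end_idx == -1:
--         return HEADER_CALENDAR_EVENTS + "\n" + events_md + note_content
--
--     before = lines[: table_end_idx + 1]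
--     after = lines[table_end_idx + 1 :]  # noqa: E203
--     return (
--         "\n".join(before)
--         + "\n\n"
--         + HEADER_CALENDAR_EVENTS
--         + events_md
--         + "\n"
--         + "\n".join(after)
--     )
-- ===== SOURCE B (Python) =====
-- HEADER_CALENDAR_EVENTS = "### Calendar Events\n"
--
-- def insert_calendar_at_top(note_content, events_md):
--     """Single pass with a flush buffer: partition the lines directly into
--     (confirmed-before, trailing-after) without computing an index or slicing."""
--     before = []
--     pending = []
--     for line in note_content.splitlines():
--         pending.append(line)
--         if "|" in line and "[[" in line and "]]" in line:
--             before.extend(pending)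
--             pending = []
--     if not before:
--         return HEADER_CALENDAR_EVENTS + "\n" + events_md + note_content
--     return (
--         "\n".join(before)
--         + "\n\n"
--         + HEADER_CALENDAR_EVENTS
--         + events_md
--         + "\n"
--         + "\n".join(pending)
--     )
-- ===== Notes on version B (the rewrite author's own statement) =====
-- stated objective: alternative
-- what changed: Instead of recording the last matching index and then slicing the line list twice, B partitions the lines in one pass with a flush buffer (pending lines are moved into 'before' each time a table line is seen), so no index arithmetic or slicing occurs at all.
import Mathlib
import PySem

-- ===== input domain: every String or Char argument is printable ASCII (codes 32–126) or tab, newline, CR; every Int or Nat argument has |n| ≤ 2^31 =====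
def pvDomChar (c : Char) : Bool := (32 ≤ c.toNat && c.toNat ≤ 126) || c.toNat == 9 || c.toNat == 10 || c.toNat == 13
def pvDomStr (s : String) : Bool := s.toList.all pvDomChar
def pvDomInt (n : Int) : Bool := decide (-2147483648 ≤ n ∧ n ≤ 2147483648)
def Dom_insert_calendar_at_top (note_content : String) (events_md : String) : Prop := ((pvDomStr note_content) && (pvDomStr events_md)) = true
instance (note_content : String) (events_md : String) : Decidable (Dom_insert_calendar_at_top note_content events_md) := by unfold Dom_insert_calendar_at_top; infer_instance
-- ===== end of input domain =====

-- B replaces A's last-index scan + double slicing by a single pass with a flush buffer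
-- that partitions the lines directly into (before, pending) — alternative decomposition.


-- ===== PORT A =====
-- '"|" in line and "[[" in line and "]]" in line'
def icatIsTableLine (line : String) : Bool :=
  PySem.Str.isIn "|" line && PySem.Str.isIn "[[" line && PySem.Str.isIn "]]" line

def insert_calendar_at_top (note_content : String) (events_md : String) : String :=
  let lines := PySem.Str.splitlines note_content
  -- forward scan over enumerate(lines), keeping the LAST matching index
  let table_end_idx : Int :=
    (PySem.List.enumerate lines 0).foldl
      (fun acc p => if icatIsTableLine p.2 then p.1 else acc) (-1)
  if table_end_idx = -1 then
    "### Calendar Events\n" ++ "\n" ++ events_md ++ note_content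
  else
    let before := PySem.List.slice lines none (some (table_end_idx + 1))
    let after := PySem.List.slice lines (some (table_end_idx + 1)) none
    PySem.Str.join "\n" before ++ "\n\n" ++ "### Calendar Events\n" ++ events_md
      ++ "\n" ++ PySem.Str.join "\n" after

-- ===== PORT B =====
-- one step of B's loop: append the line to pending, flush it into before on a table line
def icatStep (st : List String × List String) (line : String) : List String × List String :=
  let pending := st.2 ++ [line]
  if icatIsTableLine line then (st.1 ++ pending, []) else (st.1, pending)

def insert_calendar_at_top_alt (note_content : String) (events_md : String) : String :=
  let st := (PySem.Str.splitlines note_content).foldl icatStep ([], [])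
  if st.1 = [] then
    "### Calendar Events\n" ++ "\n" ++ events_md ++ note_content
  else
    PySem.Str.join "\n" st.1 ++ "\n\n" ++ "### Calendar Events\n" ++ events_md
      ++ "\n" ++ PySem.Str.join "\n" st.2

-- ===== PRECONDITION & SPEC =====
def Spec_insert_calendar_at_top (note_content : String) (events_md : String) (out : String) : Prop := out = insert_calendar_at_top_alt note_content events_md
instance (note_content : String) (events_md : String) (out : String) : Decidable (Spec_insert_calendar_at_top note_content events_md out) := by unfold Spec_insert_calendar_at_top; infer_instance

-- ===== CLAIM (what is proved, stated in full; the proofs are below) =====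
def Claim_equal_insert_calendar_at_top : Prop := ∀ (note_content : String) (events_md : String), Dom_insert_calendar_at_top note_content events_md → Spec_insert_calendar_at_top note_content events_md (insert_calendar_at_top note_content events_md)

-- ===== LEMMAS AND PROOFS =====
-- Joint characterisation of A's last-index fold and B's flush-buffer fold.
theorem icat_key (lines : List String) (k acc : Int) (before pending : List String) :
    ((PySem.List.enumerate lines k).foldl
        (fun a p => if icatIsTableLine p.2 then p.1 else a) acc = acc ∧
      lines.foldl icatStep (before, pending) = (before, pending ++ lines)) ∨
    (∃ j : Nat, j < lines.length ∧
      (PySem.List.enumerate lines k).foldl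
        (fun a p => if icatIsTableLine p.2 then p.1 else a) acc = k + j ∧
      lines.foldl icatStep (before, pending)
        = (before ++ pending ++ lines.take (j+1), lines.drop (j+1))) := by
  induction lines generalizing k acc before pending with
  | nil => left; simp [PySem.List.enumerate_nil]
  | cons line rest ih =>
    rw [PySem.List.enumerate_cons]
    simp only [List.foldl_cons, icatStep]
    by_cases h : icatIsTableLine line = true
    · simp only [h, if_pos]
      rcases ih (k+1) k (before ++ (pending ++ [line])) [] with ⟨h1, h2⟩ | ⟨j, hj, h1, h2⟩
      · right
        exact ⟨0, by simp, by simpa using h1, by simp [h2]⟩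
      · right
        refine ⟨j+1, by simpa using Nat.succ_lt_succ hj, by rw [h1]; push_cast; ring, ?_⟩
        rw [h2]; simp [List.append_assoc]
    · simp only [h, if_neg, Bool.false_eq_true, not_false_iff]
      rcases ih (k+1) acc before (pending ++ [line]) with ⟨h1, h2⟩ | ⟨j, hj, h1, h2⟩
      · left
        exact ⟨h1, by rw [h2]; simp⟩
      · right
        refine ⟨j+1, by simpa using Nat.succ_lt_succ hj, by rw [h1]; push_cast; ring, ?_⟩
        rw [h2]; simp [List.append_assoc]

-- ===== VERDICT (by name: the statement is the Claim_ definition above) =====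
theorem insert_calendar_at_top_spec : Claim_equal_insert_calendar_at_top := by
  intro note_content events_md _
  unfold Spec_insert_calendar_at_top insert_calendar_at_top insert_calendar_at_top_alt
  rcases icat_key (PySem.Str.splitlines note_content) 0 (-1) [] [] with
    ⟨h1, h2⟩ | ⟨j, hj, h1, h2⟩
  · simp [h1, h2]
  · have hnz : (0 : Int) + (j : Int) ≠ -1 := by omega
    have htk : (PySem.Str.splitlines note_content).take (j+1) ≠ [] := by
      intro h
      have := congrArg List.length h
      simp [Nat.min_eq_left (by omega : j + 1 ≤ (PySem.Str.splitlines note_content).length)] at this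
    have hb : (0 : Int) + (j : Int) + 1 = ((j : Nat) + 1 : Nat) := by push_cast; ring
    simp only [h1, h2, hnz, hb, PySem.List.slice_to_natCast,
      PySem.List.slice_from_natCast, List.nil_append]
    simp [htk]
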